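-- pv_equiv track=rewrite | github.com/Kowshik4593/health-atm | debug_indictrans2_fix.py | clean_generated
-- ===== SOURCE A (Python) =====
-- def clean_generated(full_text: str, prompt: str) -> str:
--     """Remove prompt echo and trimming repeated tails."""
--     # Remove prompt echo if present at beginning
--     if full_text.startswith(prompt):
--         out = full_text[len(prompt):].strip()
--     else:
--         out = full_text
--     # Collapse excessive repeated tokens (simple heuristic)
--     tokens = out.split()
--     if len(tokens) > 80:
--         # detect long repeated token sequences — remove runs longer than 12
--         cleaned = []
--         last = None
--         run = 0
--         for t in tokens:
--             if t == last:
--                 run += 1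
--             else:
--                 run = 1
--             if run <= 12:  # allow short repetition but stop runaway
--                 cleaned.append(t)
--             last = t
--         out = " ".join(cleaned)
--     # final whitespace fix
--     return out.strip()
-- ===== SOURCE B (Python) =====
-- def clean_generated(full_text: str, prompt: str) -> str:
--     """Remove prompt echo and trimming repeated tails."""
--     if full_text.startswith(prompt):
--         out = full_text[len(prompt):].strip()
--     else:
--         out = full_text
--     tokens = out.split()
--     if len(tokens) > 80:
--         # run-based pass: find each maximal run of equal tokens, keep at most 12
--         cleaned = []
--         rest = tokens
--         while rest:
--             tok = rest[0]
--             run = 1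
--             while run < len(rest) and rest[run] == tok:
--                 run += 1
--             cleaned += [tok] * min(run, 12)
--             rest = rest[run:]
--         out = " ".join(cleaned)
--     return out.strip()
-- ===== Notes on version B (the rewrite author's own statement) =====
-- stated objective: alternative
-- what changed: Replaces A's per-token loop carrying last/run counter state with a run-based two-pointer pass: each maximal run of equal tokens is located as a block and truncated to its first 12 copies.
import Mathlib
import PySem

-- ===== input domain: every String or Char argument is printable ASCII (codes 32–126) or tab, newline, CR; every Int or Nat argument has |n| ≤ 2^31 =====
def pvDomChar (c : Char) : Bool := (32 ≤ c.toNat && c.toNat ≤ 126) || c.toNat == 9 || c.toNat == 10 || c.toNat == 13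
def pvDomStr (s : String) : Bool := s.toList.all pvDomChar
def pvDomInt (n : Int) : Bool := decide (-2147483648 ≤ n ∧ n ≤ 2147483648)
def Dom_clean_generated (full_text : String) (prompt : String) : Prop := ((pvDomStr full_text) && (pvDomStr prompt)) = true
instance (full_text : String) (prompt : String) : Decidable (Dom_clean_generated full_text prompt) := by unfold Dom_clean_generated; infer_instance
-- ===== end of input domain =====

-- B replaces A's per-token loop with last/run counter state by a run-based pass that
-- truncates each maximal run of equal tokens to its first 12 copies (alternative decomposition, same cost).


-- ===== PORT A =====
-- one step of A's for-loop: state = (cleaned, last, run)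
def stepA (st : List String × Option String × Int) (t : String) : List String × Option String × Int :=
  let run : Int := if some t == st.2.1 then st.2.2 + 1 else 1
  let cleaned := if run ≤ 12 then st.1 ++ [t] else st.1
  (cleaned, some t, run)

def clean_generated (full_text : String) (prompt : String) : String :=
  let out := if PySem.Str.startswith full_text prompt
    then PySem.Str.strip (PySem.Str.slice full_text (some (PySem.Str.len prompt)) none)
    else full_text
  let tokens := PySem.Str.split₀ out
  let out := if tokens.length > 80
    then PySem.Str.join " " (tokens.foldl stepA ([], none, 0)).1
    else out
  PySem.Str.strip out

-- ===== PORT B =====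
-- B's outer while over `rest`; the inner while computes run = 1 + number of leading
-- elements of the tail equal to the head (exactly `(rest.takeWhile (· == t)).length`),
-- `rest[run:]` is `.drop run`, `[tok]*min(run,12)` is `List.replicate (min run 12) t`.
def capRuns : List String → List String
  | [] => []
  | t :: rest =>
    let run := 1 + (rest.takeWhile (· == t)).length
    List.replicate (min run 12) t ++ capRuns ((t :: rest).drop run)
termination_by l => l.length
decreasing_by
  simp only [List.length_drop, List.length_cons]
  omega

def clean_generated_alt (full_text : String) (prompt : String) : String :=
  let out := if PySem.Str.startswith full_text prompt
    then PySem.Str.strip (PySem.Str.slice full_text (some (PySem.Str.len prompt)) none)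
    else full_text
  let tokens := PySem.Str.split₀ out
  let out := if tokens.length > 80
    then PySem.Str.join " " (capRuns tokens)
    else out
  PySem.Str.strip out

-- ===== PRECONDITION & SPEC =====
def Spec_clean_generated (full_text : String) (prompt : String) (out : String) : Prop := out = clean_generated_alt full_text prompt
instance (full_text : String) (prompt : String) (out : String) : Decidable (Spec_clean_generated full_text prompt out) := by unfold Spec_clean_generated; infer_instance

-- ===== CLAIM (what is proved, stated in full; the proofs are below) =====
def Claim_equal_clean_generated : Prop := ∀ (full_text : String) (prompt : String), Dom_clean_generated full_text prompt → Spec_clean_generated full_text prompt (clean_generated full_text prompt)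

-- ===== LEMMAS AND PROOFS =====

-- tokens emitted by A's loop from state (last, run) onward
def capFromO (last : Option String) (run : Int) : List String → List String
  | [] => []
  | t :: ts =>
    let run' : Int := if some t == last then run + 1 else 1
    (if run' ≤ 12 then [t] else []) ++ capFromO (some t) run' ts

-- what capFromO does at a fresh token (run about to restart)
def contin : List String → List String
  | [] => []
  | r :: rs => r :: capFromO (some r) 1 rs

theorem foldl_stepA_fst (ts : List String) (cleaned : List String) (last : Option String)
    (run : Int) :
    (ts.foldl stepA (cleaned, last, run)).1 = cleaned ++ capFromO last run ts := by
  induction ts generalizing cleaned last run with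
  | nil => simp [capFromO]
  | cons t ts ih =>
    simp only [List.foldl_cons, stepA, capFromO]
    split
    · rw [ih]; split_ifs <;> simp
    · rw [ih]; split_ifs <;> simp

theorem drop_takeWhile_length {α : Type} (p : α → Bool) (l : List α) :
    l.drop (l.takeWhile p).length = l.dropWhile p := by
  induction l with
  | nil => rfl
  | cons a l ih =>
    simp only [List.takeWhile, List.dropWhile]
    cases h : p a
    · simp
    · simpa using ih

theorem capFromO_run (ss : List String) (s : String) (run : Int) (h : 1 ≤ run) :
    capFromO (some s) run ss =
      List.replicate (min ((ss.takeWhile (· == s)).length) (12 - run).toNat) s ++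
        contin (ss.dropWhile (· == s)) := by
  induction ss generalizing run with
  | nil => simp [capFromO, contin]
  | cons r rs ih =>
    by_cases hr : r = s
    · subst hr
      rw [show capFromO (some r) run (r :: rs)
            = (if run + 1 ≤ 12 then [r] else []) ++ capFromO (some r) (run + 1) rs by
          simp [capFromO]]
      rw [ih (run + 1) (by omega)]
      rw [show List.takeWhile (· == r) (r :: rs) = r :: List.takeWhile (· == r) rs by
          simp]
      rw [show List.dropWhile (· == r) (r :: rs) = List.dropWhile (· == r) rs by
          simp]
      by_cases h12 : run + 1 ≤ 12
      · rw [if_pos h12]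
        have hmin : min ((r :: List.takeWhile (· == r) rs).length) ((12 : Int) - run).toNat
            = (min ((List.takeWhile (· == r) rs).length) ((12 : Int) - (run + 1)).toNat) + 1 := by
          simp only [List.length_cons]; omega
        rw [hmin, List.replicate_succ]
        simp
      · rw [if_neg h12]
        have h1 : ((12 : Int) - run).toNat = 0 := by omega
        have h2 : ((12 : Int) - (run + 1)).toNat = 0 := by omega
        simp [h1, h2]
    · have hb : (r == s) = false := by simpa using hr
      simp [capFromO, hb, contin]

theorem capRuns_eq_contin (ts : List String) : capRuns ts = contin ts := by
  induction hn : ts.length using Nat.strong_induction_on generalizing ts with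
  | _ n ih =>
  cases ts with
  | nil => simp [capRuns, contin]
  | cons t rest =>
    rw [capRuns]
    have hdrop : (t :: rest).drop (1 + (rest.takeWhile (· == t)).length)
        = rest.dropWhile (· == t) := by
      rw [Nat.add_comm, List.drop_succ_cons, drop_takeWhile_length]
    rw [hdrop]
    rw [ih ((rest.dropWhile (· == t)).length)
        (by subst hn
            simp only [List.length_cons]
            have := List.length_dropWhile_le (p := (· == t)) (l := rest)
            omega)
        _ rfl]
    rw [show contin (t :: rest) = t :: capFromO (some t) 1 rest from rfl]
    rw [capFromO_run rest t 1 (by norm_num)]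
    have hmin : min (1 + (rest.takeWhile (· == t)).length) 12
        = (min ((rest.takeWhile (· == t)).length) ((12 : Int) - 1).toNat) + 1 := by
      omega
    rw [hmin, List.replicate_succ]
    simp

theorem capFromO_none (ts : List String) : capFromO none 0 ts = contin ts := by
  cases ts with
  | nil => rfl
  | cons t ts => simp [capFromO, contin]

theorem foldl_eq_capRuns (ts : List String) :
    (ts.foldl stepA ([], none, 0)).1 = capRuns ts := by
  rw [foldl_stepA_fst, capRuns_eq_contin, capFromO_none]
  simp

-- ===== VERDICT (by name: the statement is the Claim_ definition above) =====
theorem clean_generated_spec : Claim_equal_clean_generated := by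
  intro full_text prompt _
  unfold Spec_clean_generated clean_generated clean_generated_alt
  simp only [foldl_eq_capRuns]
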